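-- pv_equiv track=rewrite | github.com/jimmy-academia/dev-ADDM | src/addm/tasks/prompt_parser.py | get_l0_field_order
-- ===== SOURCE A (Python) =====
-- from typing import Dict, Optional
--
-- def get_l0_field_order(l0_schema: Dict[str, Dict[str, str]]) -> list[str]:
--     """Get ordered list of L0 field names."""
--     # Common field order (task-agnostic)
--     preferred_order = [
--         "incident_severity",
--         "account_type",
--         "assurance_claim",
--         "staff_response",
--     ]
--     fields = []
--     for field in preferred_order:
--         if field in l0_schema:
--             fields.append(field)
--     # Add any remaining fields
--     for field in l0_schema:
--         if field not in fields:
--             fields.append(field)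
--     return fields
-- ===== SOURCE B (Python) =====
-- def get_l0_field_order(l0_schema):
--     """Get ordered list of L0 field names."""
--     preferred_order = [
--         "incident_severity",
--         "account_type",
--         "assurance_claim",
--         "staff_response",
--     ]
--     rank = {f: i for i, f in enumerate(preferred_order)}
--     # One stable sort: preferred fields by their rank, everything else keeps
--     # dict-insertion order under the shared sentinel key len(preferred_order).
--     return sorted(l0_schema, key=lambda f: rank.get(f, len(preferred_order)))
-- ===== Notes on version B (the rewrite author's own statement) =====
-- stated objective: faster
-- what changed: Replaces A's two accumulating filter loops (the second tests membership in the growing output list, making A quadratic) with a single stable sort of the schema's keys under a rank key (index in preferred_order, sentinel len(preferred_order) for the rest), relying on sort stability to keep non-preferred fields in dict-insertion order.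
import Mathlib
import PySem

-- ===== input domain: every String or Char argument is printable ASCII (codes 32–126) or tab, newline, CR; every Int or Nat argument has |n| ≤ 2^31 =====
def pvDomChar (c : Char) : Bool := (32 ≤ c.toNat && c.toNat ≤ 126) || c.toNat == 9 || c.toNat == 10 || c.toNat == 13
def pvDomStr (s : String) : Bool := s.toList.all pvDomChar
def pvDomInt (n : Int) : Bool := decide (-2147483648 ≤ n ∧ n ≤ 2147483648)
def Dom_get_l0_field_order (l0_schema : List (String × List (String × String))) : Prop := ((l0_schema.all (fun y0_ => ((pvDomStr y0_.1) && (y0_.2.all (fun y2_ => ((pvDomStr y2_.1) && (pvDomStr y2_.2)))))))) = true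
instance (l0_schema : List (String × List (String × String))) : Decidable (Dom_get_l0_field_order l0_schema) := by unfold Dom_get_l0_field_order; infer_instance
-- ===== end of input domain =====

-- B replaces A's two filtering passes (quadratic via the 'not in fields' scan) with one stable sort under a rank key; measured faster.

-- the module-level preferred_order constant, shared verbatim by both Pythons
def pvPreferredOrder : List String :=
  ["incident_severity", "account_type", "assurance_claim", "staff_response"]

-- ===== PORT A =====
-- 'field in l0_schema' / 'for field in l0_schema' read the dict's keys; duplicates in the
-- association list are collapsed by the loop's own 'not in fields' test, matching dict semantics.
def get_l0_field_order (l0_schema : List (String × List (String × String))) : List String :=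
  let keys := l0_schema.map Prod.fst
  let fields := pvPreferredOrder.foldl
    (fun acc field => if keys.contains field then acc ++ [field] else acc) []
  keys.foldl (fun acc field => if acc.contains field then acc else acc ++ [field]) fields

-- ===== PORT B =====
-- 'sorted(l0_schema, key=…)' iterates the dict's keys: first occurrences, i.e. PySem.Set.ofList.
def get_l0_field_order_alt (l0_schema : List (String × List (String × String))) : List String :=
  let rank : PySem.Dict String Int :=
    PySem.Dict.ofList ((PySem.List.enumerate pvPreferredOrder).map (fun p => (p.2, p.1)))
  PySem.List.sorted (PySem.Set.ofList (l0_schema.map Prod.fst))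
    (fun f => rank.getD f (pvPreferredOrder.length : Int)) false

-- ===== PRECONDITION & SPEC =====
def Spec_get_l0_field_order (l0_schema : List (String × List (String × String))) (out : List String) : Prop := out = get_l0_field_order_alt l0_schema
instance (l0_schema : List (String × List (String × String))) (out : List String) : Decidable (Spec_get_l0_field_order l0_schema out) := by unfold Spec_get_l0_field_order; infer_instance

-- ===== CLAIM (what is proved, stated in full; the proofs are below) =====
def Claim_equal_get_l0_field_order : Prop := ∀ (l0_schema : List (String × List (String × String))), Dom_get_l0_field_order l0_schema → Spec_get_l0_field_order l0_schema (get_l0_field_order l0_schema)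

-- ===== LEMMAS AND PROOFS =====

-- the rank key as a plain function
def pvRnk (f : String) : Int :=
  if "incident_severity" = f then 0
  else if "account_type" = f then 1
  else if "assurance_claim" = f then 2
  else if "staff_response" = f then 3
  else 4

-- first-occurrence dedup in a structurally recursive form
def pvD : List String → List String
  | [] => []
  | x :: t => x :: pvD (t.filter (fun y => y ≠ x))
termination_by l => l.length
decreasing_by
  have h := List.length_filter_le (fun (y : Subtype (Membership.mem t)) => !decide (↑y = x)) t.attach
  simp at h
  simpa using Nat.lt_succ_of_le h

lemma pvRnk_le_four (f : String) : pvRnk f ≤ 4 := by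
  unfold pvRnk; split_ifs <;> omega

lemma pvRnk_eq_four_of_not_mem {f : String} (h : f ∉ pvPreferredOrder) : pvRnk f = 4 := by
  simp [pvPreferredOrder] at h
  unfold pvRnk
  split_ifs with h1 h2 h3 h4 <;> simp_all [eq_comm]

lemma pvRnk_lt_four_of_mem {f : String} (h : f ∈ pvPreferredOrder) : pvRnk f < 4 := by
  simp [pvPreferredOrder] at h
  unfold pvRnk
  rcases h with h | h | h | h <;> subst h <;> simp

lemma insertBy_all_lt {x : String} {B : List String}
    (h : ∀ b ∈ B, pvRnk x < pvRnk b) :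
    PySem.List.insertBy (fun a b => decide (pvRnk a < pvRnk b)) x B = x :: B := by
  cases B with
  | nil => rfl
  | cons b t => simp [PySem.List.insertBy, h b (by simp)]

lemma insert_pref (S B : List String) (x : String) (hx : x ∈ pvPreferredOrder) (hxS : x ∉ S)
    (hB : ∀ b ∈ B, pvRnk b = 4) :
    PySem.List.insertBy (fun a b => decide (pvRnk a < pvRnk b)) x
        (pvPreferredOrder.filter (fun p => decide (p ∈ S)) ++ B)
      = pvPreferredOrder.filter (fun p => decide (p ∈ (x :: S))) ++ B := by
  have hBlt : ∀ b ∈ B, pvRnk x < pvRnk b := by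
    intro b hb; rw [hB b hb]; exact pvRnk_lt_four_of_mem hx
  have hrw := insertBy_all_lt hBlt
  simp [pvPreferredOrder] at hx
  by_cases h1 : "incident_severity" ∈ S <;>
  by_cases h2 : "account_type" ∈ S <;>
  by_cases h3 : "assurance_claim" ∈ S <;>
  by_cases h4 : "staff_response" ∈ S <;>
  rcases hx with h | h | h | h <;> subst h <;>
  simp_all [pvPreferredOrder, PySem.List.insertBy, pvRnk]

lemma fold_sorted : ∀ (ks S B : List String), ks.Nodup → (∀ k ∈ ks, k ∉ S) →
    (∀ b ∈ B, pvRnk b = 4) →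
    ks.foldl (fun acc x => PySem.List.insertBy (fun a b => decide (pvRnk a < pvRnk b)) x acc)
        (pvPreferredOrder.filter (fun p => decide (p ∈ S)) ++ B)
      = pvPreferredOrder.filter (fun p => decide (p ∈ S ∨ p ∈ ks)) ++ B
          ++ ks.filter (fun k => !pvPreferredOrder.contains k) := by
  intro ks
  induction ks with
  | nil => intro S B _ _ _; simp
  | cons x t ih =>
    intro S B hnd hS hB
    have hxt : x ∉ t := (List.nodup_cons.mp hnd).1
    have hndt : t.Nodup := (List.nodup_cons.mp hnd).2
    simp only [List.foldl_cons]
    by_cases hx : x ∈ pvPreferredOrder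
    · rw [insert_pref S B x hx (hS x (by simp)) hB]
      rw [ih (x :: S) B hndt
        (by intro k hk; simp only [List.mem_cons, not_or]
            exact ⟨fun he => hxt (he ▸ hk), hS k (List.mem_cons_of_mem x hk)⟩) hB]
      have e1 : pvPreferredOrder.filter (fun p => decide (p ∈ x :: S ∨ p ∈ t))
          = pvPreferredOrder.filter (fun p => decide (p ∈ S ∨ p ∈ x :: t)) := by
        apply List.filter_congr; intro p _
        simp only [List.mem_cons, decide_eq_decide]; tauto
      have e2 : (x :: t).filter (fun k => !pvPreferredOrder.contains k)
          = t.filter (fun k => !pvPreferredOrder.contains k) := by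
        simp [hx]
      rw [e1, e2]
    · have h4 : pvRnk x = 4 := pvRnk_eq_four_of_not_mem hx
      rw [PySem.List.insertBy_of_forall_not_before _ _ _
        (by intro y _; simp only [decide_eq_false_iff_not, not_lt, h4]
            exact pvRnk_le_four y)]
      rw [List.append_assoc]
      rw [ih S (B ++ [x]) hndt
        (fun k hk => hS k (List.mem_cons_of_mem x hk))
        (by intro b hb
            rcases List.mem_append.mp hb with h | h
            · exact hB b h
            · simp at h; subst h; exact h4)]
      have e1 : pvPreferredOrder.filter (fun p => decide (p ∈ S ∨ p ∈ t))
          = pvPreferredOrder.filter (fun p => decide (p ∈ S ∨ p ∈ x :: t)) := by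
        apply List.filter_congr; intro p hp
        have : p ≠ x := fun he => hx (he ▸ hp)
        simp only [List.mem_cons, decide_eq_decide]; tauto
      have e2 : (x :: t).filter (fun k => !pvPreferredOrder.contains k)
          = x :: t.filter (fun k => !pvPreferredOrder.contains k) := by
        simp [hx]
      rw [e1, e2]
      simp [List.append_assoc]

lemma key_eq (f : String) :
    (PySem.Dict.ofList ((PySem.List.enumerate pvPreferredOrder).map (fun p => (p.2, p.1)))).getD f
      (pvPreferredOrder.length : Int) = pvRnk f := by
  have hd : (PySem.Dict.ofList ((PySem.List.enumerate pvPreferredOrder).map (fun p => (p.2, p.1))))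
      = PySem.Dict.mk [("incident_severity", (0:Int)), ("account_type", 1),
          ("assurance_claim", 2), ("staff_response", 3)] := by rfl
  rw [hd]
  have hl : ((pvPreferredOrder.length : Nat) : Int) = 4 := by rfl
  rw [hl]
  simp only [PySem.Dict.getD, PySem.Dict.get?_mk_cons, beq_iff_eq, pvRnk]
  split_ifs <;> rfl

lemma pvD_mem_iff (l : List String) (y : String) : y ∈ pvD l ↔ y ∈ l := by
  match l with
  | [] => simp [pvD]
  | x :: t =>
    rw [pvD]
    by_cases hy : y = x
    · simp [hy]
    · simp only [List.mem_cons, hy, false_or]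
      rw [pvD_mem_iff (t.filter (fun y => y ≠ x)) y]
      simp [List.mem_filter, hy]
termination_by l.length
decreasing_by
  have h := List.length_filter_le (fun (y : String) => decide ¬(y = x)) t
  simpa using Nat.lt_succ_of_le h

lemma pvD_nodup (l : List String) : (pvD l).Nodup := by
  match l with
  | [] => simp [pvD]
  | x :: t =>
    rw [pvD]
    refine List.nodup_cons.mpr ⟨?_, pvD_nodup (t.filter (fun y => y ≠ x))⟩
    intro hx
    have h := (pvD_mem_iff _ x).mp hx
    simp [List.mem_filter] at h
termination_by l.length
decreasing_by
  have h := List.length_filter_le (fun (y : String) => decide ¬(y = x)) t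
  simpa using Nat.lt_succ_of_le h

lemma pvD_filter (p : String → Bool) (l : List String) :
    pvD (l.filter p) = (pvD l).filter p := by
  match l with
  | [] => simp [pvD]
  | x :: t =>
    by_cases hx : p x
    · rw [List.filter_cons_of_pos hx, pvD, pvD, List.filter_cons_of_pos hx]
      congr 1
      rw [← pvD_filter p (t.filter (fun y => y ≠ x))]
      congr 1
      simp [List.filter_filter, Bool.and_comm]
    · rw [List.filter_cons_of_neg hx]
      conv_rhs => rw [pvD]
      rw [List.filter_cons_of_neg hx]
      rw [← pvD_filter p (t.filter (fun y => y ≠ x))]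
      congr 1
      rw [List.filter_filter]
      symm
      apply List.filter_congr
      intro a _
      by_cases ha : a = x
      · subst ha; simp [hx]
      · simp [ha]
termination_by l.length
decreasing_by
  all_goals
    have h := List.length_filter_le (fun (y : String) => decide ¬(y = x)) t
    simpa using Nat.lt_succ_of_le h

lemma loopA : ∀ (keys acc : List String),
    keys.foldl (fun acc f => if acc.contains f then acc else acc ++ [f]) acc
      = acc ++ pvD (keys.filter (fun k => !acc.contains k)) := by
  intro keys
  induction keys with
  | nil => intro acc; simp [pvD]
  | cons x t ih =>
    intro acc
    simp only [List.foldl_cons]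
    by_cases hx : acc.contains x
    · rw [if_pos hx, ih acc, List.filter_cons_of_neg (by simpa using hx)]
    · rw [if_neg hx, ih (acc ++ [x]), List.filter_cons_of_pos (by simpa using hx), pvD,
        List.append_assoc, List.singleton_append]
      congr 2
      rw [List.filter_filter]
      congr 1
      apply List.filter_congr
      intro k _
      by_cases hk : k = x
      · subst hk; simp
      · simp [hk]

lemma ofList_eq_pvD (keys : List String) : PySem.Set.ofList keys = pvD keys := by
  rw [PySem.Set.ofList_eq_foldl]
  have h : List.foldl PySem.Set.add ([] : List String) keys
      = keys.foldl (fun acc f => if acc.contains f then acc else acc ++ [f]) [] := rfl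
  rw [h, loopA]
  simp

theorem get_l0_field_order_spec : Claim_equal_get_l0_field_order := by
  intro l _
  unfold Spec_get_l0_field_order
  have hA : get_l0_field_order l
      = pvPreferredOrder.filter (fun f => (l.map Prod.fst).contains f)
          ++ (pvD (l.map Prod.fst)).filter (fun k => !pvPreferredOrder.contains k) := by
    have hdef : get_l0_field_order l
        = (l.map Prod.fst).foldl
            (fun acc field => if acc.contains field then acc else acc ++ [field])
            (pvPreferredOrder.foldl
              (fun acc field => if (l.map Prod.fst).contains field then acc ++ [field] else acc)
              []) := rfl
    rw [hdef, PySem.List.foldl_append_if_eq_filter, loopA]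
    simp only [List.nil_append]
    congr 1
    rw [← pvD_filter]
    congr 1
    apply List.filter_congr
    intro k hk
    simp only [List.contains_eq_mem] at hk ⊢
    by_cases hp : pvPreferredOrder.contains k
    · simp [List.mem_filter, (by simpa using hk : k ∈ l.map Prod.fst)]
    · have hnp : k ∉ pvPreferredOrder := by simpa using hp
      simp [List.mem_filter, hnp]
  have hB : get_l0_field_order_alt l
      = pvPreferredOrder.filter (fun f => (l.map Prod.fst).contains f)
          ++ (pvD (l.map Prod.fst)).filter (fun k => !pvPreferredOrder.contains k) := by
    have hdef : get_l0_field_order_alt l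
        = PySem.List.sorted (PySem.Set.ofList (l.map Prod.fst))
            (fun f => (PySem.Dict.ofList ((PySem.List.enumerate pvPreferredOrder).map
              (fun p => (p.2, p.1)))).getD f (pvPreferredOrder.length : Int)) false := rfl
    have hk : (fun f => (PySem.Dict.ofList ((PySem.List.enumerate pvPreferredOrder).map
        (fun p => (p.2, p.1)))).getD f (pvPreferredOrder.length : Int)) = pvRnk := funext key_eq
    rw [hdef, hk, PySem.List.sorted_eq_foldl_insertBy, ofList_eq_pvD]
    have h := fold_sorted (pvD (l.map Prod.fst)) [] [] (pvD_nodup _) (by simp) (by simp)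
    simp only [List.append_nil, List.not_mem_nil, false_or,
      decide_false, List.filter_false] at h
    rw [h]
    congr 1
    apply List.filter_congr
    intro p _
    simp [pvD_mem_iff]
  rw [hA, hB]
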